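-- pv_equiv track=rewrite | github.com/jcole75/arc_2025_mindsai | src/modules/grid_utils.py | decode_symbols_in_text
-- ===== SOURCE A (Python) =====
-- _DIGITS = "0123456789"
--
-- _LETTERS = "abcdefghij"
--
-- def decode_symbols_in_text(text: str) -> str:
--     """Map letter symbols back to digits in free-form text.
--     a->0, b->1, ..., j->9 (case-insensitive). Other chars preserved.
--     """
--     if not isinstance(text, str):
--         text = str(text)
--     # Build translation table for both lowercase and uppercase letters
--     trans = {}
--     for i, ch in enumerate(_LETTERS):
--         trans[ord(ch)] = ord(_DIGITS[i])
--         trans[ord(ch.upper())] = ord(_DIGITS[i])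
--     return text.translate(trans)
-- ===== SOURCE B (Python) =====
-- def decode_symbols_in_text(text: str) -> str:
--     if not isinstance(text, str):
--         text = str(text)
--     out = []
--     for ch in text:
--         cl = ch.lower()
--         if 'a' <= cl <= 'j':
--             out.append(chr(ord('0') + ord(cl) - ord('a')))
--         else:
--             out.append(ch)
--     return ''.join(out)
-- ===== Notes on version B (the rewrite author's own statement) =====
-- stated objective: simpler
-- what changed: Drops the precomputed two-case translation table and str.translate; B maps each character arithmetically (lower-case it, and if it is in a-j shift its code into 0-9), joining the results.
import Mathlib
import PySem

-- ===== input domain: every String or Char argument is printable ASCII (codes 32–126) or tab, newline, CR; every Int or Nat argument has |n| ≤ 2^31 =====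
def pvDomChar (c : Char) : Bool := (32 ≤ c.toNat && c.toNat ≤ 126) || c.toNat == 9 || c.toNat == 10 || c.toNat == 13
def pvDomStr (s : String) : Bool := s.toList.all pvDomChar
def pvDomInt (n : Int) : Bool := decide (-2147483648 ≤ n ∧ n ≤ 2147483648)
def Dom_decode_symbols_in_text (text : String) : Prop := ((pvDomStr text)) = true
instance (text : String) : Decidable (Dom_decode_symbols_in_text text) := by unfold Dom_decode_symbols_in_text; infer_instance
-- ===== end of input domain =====

-- B drops A's precomputed translation table and str.translate: it maps every character
-- arithmetically (lower-case, then shift a..j into 0..9). Objective: simpler.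

-- ===== PORT A =====
def pvDigitsA : List Char := ['0','1','2','3','4','5','6','7','8','9']
def pvLettersA : List Char := ['a','b','c','d','e','f','g','h','i','j']

-- ch.upper() for a single char; exact on ASCII (all chars of pvLettersA are ASCII lowercase)
def pvCharUpperA (c : Char) : Char :=
  if 'a' ≤ c ∧ c ≤ 'z' then Char.ofNat (c.toNat - 32) else c

-- the loop building trans: trans[ord(ch)] = ord(_DIGITS[i]); trans[ord(ch.upper())] = ord(_DIGITS[i])
def pvTransA : PySem.Dict Int Int :=
  (PySem.List.enumerate pvLettersA).foldl
    (fun d p =>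
      match PySem.List.pyGet? pvDigitsA p.1 with
      | some dg => (d.insert (Int.ofNat p.2.toNat) (Int.ofNat dg.toNat)).insert
                     (Int.ofNat (pvCharUpperA p.2).toNat) (Int.ofNat dg.toNat)
      | none => d)  -- unreachable: _DIGITS has an i-th char for every i < len(_LETTERS)
    PySem.Dict.empty

-- text.translate(trans): replace each code point found in the table, keep the rest
def decode_symbols_in_text (text : String) : String :=
  String.mk (text.toList.map (fun c =>
    match pvTransA.get? (Int.ofNat c.toNat) with
    | some v => Char.ofNat v.toNat
    | none => c))

-- ===== PORT B =====
-- ch.lower() for a single char; exact on ASCII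
def pvCharLowerB (c : Char) : Char :=
  if 'A' ≤ c ∧ c ≤ 'Z' then Char.ofNat (c.toNat + 32) else c

def pvDecodeCharB (ch : Char) : Char :=
  let cl := pvCharLowerB ch
  if 'a' ≤ cl ∧ cl ≤ 'j' then Char.ofNat ('0'.toNat + cl.toNat - 'a'.toNat) else ch

def decode_symbols_in_text_alt (text : String) : String :=
  String.mk (text.toList.map pvDecodeCharB)

-- ===== PRECONDITION & SPEC =====
def Spec_decode_symbols_in_text (text : String) (out : String) : Prop := out = decode_symbols_in_text_alt text
instance (text : String) (out : String) : Decidable (Spec_decode_symbols_in_text text out) := by unfold Spec_decode_symbols_in_text; infer_instance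

-- ===== CLAIM (what is proved, stated in full; the proofs are below) =====
def Claim_equal_decode_symbols_in_text : Prop := ∀ (text : String), Dom_decode_symbols_in_text text → Spec_decode_symbols_in_text text (decode_symbols_in_text text)

-- ===== LEMMAS AND PROOFS =====

-- A's per-character translation, named so the pointwise lemma can speak about it
def pvDecodeCharA (c : Char) : Char :=
  match pvTransA.get? (Int.ofNat c.toNat) with
  | some v => Char.ofNat v.toNat
  | none => c

set_option maxRecDepth 4000 in
lemma decodeCharA_eq_B_ofNat : ∀ n : Nat, n < 256 → pvDecodeCharA (Char.ofNat n) = pvDecodeCharB (Char.ofNat n) := by decide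

lemma decodeCharA_eq_B (c : Char) (h : pvDomChar c = true) : pvDecodeCharA c = pvDecodeCharB c := by
  have hn : c.toNat < 256 := by
    simp [pvDomChar] at h
    omega
  have := decodeCharA_eq_B_ofNat c.toNat hn
  rwa [Char.ofNat_toNat] at this

-- ===== VERDICT (by name: the statement is the Claim_ definition above) =====
theorem decode_symbols_in_text_spec : Claim_equal_decode_symbols_in_text := by
  intro text hdom
  unfold Spec_decode_symbols_in_text decode_symbols_in_text decode_symbols_in_text_alt
  have hall : ∀ c ∈ text.toList, pvDomChar c = true := by
    simpa [Dom_decode_symbols_in_text, pvDomStr, List.all_eq_true] using hdom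
  congr 1
  apply List.map_congr_left
  intro c hc
  exact decodeCharA_eq_B c (hall c hc)
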